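-- pv_equiv track=rewrite | github.com/dtaylor211/cs130 | tests/performance/test_mesh_update.py | get_loc_from_coords
-- ===== SOURCE A (Python) =====
-- from typing import Tuple
--
-- def get_loc_from_coords(coords: Tuple[int, int]) -> str:
--     '''
--     Get a cell location from its coordinates (FROM utils.py)
--
--     Throw a ValueError if the coordinates are invalid or out of bounds
--
--     Arguments:
--     - coords: Tuple[int, int] - tuple of col, row coordinates
--
--     Returns:
--     - str of cell location
--
--     '''
--
--     col, row = coords
--     if col < 1 or row < 1 or col > 9999 or row > 9999:
--         raise ValueError("Invalid coordinates")
--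
--     col_name = ""
--     while col > 0:
--         col_name = chr((col - 1) % 26 + ord('A')) + col_name
--         col = (col - 1) // 26
--
--     return col_name.upper() + str(row)
-- ===== SOURCE B (Python) =====
-- from typing import Tuple
--
-- def get_loc_from_coords(coords: Tuple[int, int]) -> str:
--     col, row = coords
--     if col < 1 or row < 1 or col > 9999 or row > 9999:
--         raise ValueError("Invalid coordinates")
--
--     # col <= 9999 < 18279, so the column label has at most three letters;
--     # pick the closed-form digits directly by range.
--     A = ord('A')
--     if col <= 26:
--         name = chr(A + col - 1)
--     elif col <= 702:
--         q, r = divmod(col - 27, 26)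
--         name = chr(A + q) + chr(A + r)
--     else:
--         n = col - 703
--         name = chr(A + n // 676) + chr(A + n // 26 % 26) + chr(A + n % 26)
--
--     return name + str(row)
-- ===== Notes on version B (the rewrite author's own statement) =====
-- stated objective: alternative
-- what changed: A's while-loop that repeatedly divides col and prepends characters (plus a redundant .upper() pass) is replaced by a loop-free closed form: since valid columns are at most 9999 the label has at most three letters, so B picks 1, 2 or 3 letter digits directly by a range split with divmod arithmetic.
import Mathlib
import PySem

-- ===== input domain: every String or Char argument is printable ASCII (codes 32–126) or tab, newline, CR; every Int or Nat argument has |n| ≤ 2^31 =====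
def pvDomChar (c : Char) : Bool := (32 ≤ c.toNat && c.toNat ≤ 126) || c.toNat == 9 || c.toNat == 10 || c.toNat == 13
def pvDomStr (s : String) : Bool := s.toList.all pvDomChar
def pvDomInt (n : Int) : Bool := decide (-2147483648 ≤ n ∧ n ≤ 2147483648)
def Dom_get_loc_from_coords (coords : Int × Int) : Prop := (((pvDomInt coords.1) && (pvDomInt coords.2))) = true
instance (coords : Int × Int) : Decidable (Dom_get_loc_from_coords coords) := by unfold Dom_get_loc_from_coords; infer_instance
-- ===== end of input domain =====

-- B replaces A's while-loop column naming (and its redundant .upper() pass) by a loop-free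
-- closed form: valid columns (≤ 9999) have at most three letters, chosen by a range split.


-- ===== PORT A =====
-- A's while loop: col_name = chr((col-1) % 26 + ord('A')) + col_name; col = (col-1) // 26
def pvALoop (col : Int) (colName : List Char) : List Char :=
  if 0 < col then
    pvALoop (PySem.Int.floordiv (col - 1) 26)
      (Char.ofNat ((PySem.Int.mod (col - 1) 26).toNat + 65) :: colName)
  else colName
termination_by col.toNat
decreasing_by
  have h1 : PySem.Int.floordiv (col - 1) 26 = (col - 1) / 26 :=
    PySem.Int.floordiv_eq_ediv_of_pos (by omega)
  have h2 : (col - 1) / 26 ≤ col - 1 := Int.ediv_le_self 26 (by omega)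
  have h3 : 0 ≤ (col - 1) / 26 := Int.ediv_nonneg (by omega) (by omega)
  omega

-- col_name.upper() + str(row)  (string + is concatenation of the code-point lists)
def get_loc_from_coords (coords : Int × Int) : String :=
  String.mk (PySem.Chars.upper (pvALoop coords.1 []) ++ PySem.Int.toChars coords.2)

-- ===== PORT B =====
-- B's range split: one letter for col ≤ 26, two for col ≤ 702, otherwise three.
def get_loc_from_coords_alt (coords : Int × Int) : String :=
  let col := coords.1
  let name : List Char :=
    if col ≤ 26 then
      [Char.ofNat (65 + (col - 1).toNat)]
    else if col ≤ 702 then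
      [Char.ofNat (65 + (PySem.Int.floordiv (col - 27) 26).toNat),
       Char.ofNat (65 + (PySem.Int.mod (col - 27) 26).toNat)]
    else
      [Char.ofNat (65 + (PySem.Int.floordiv (col - 703) 676).toNat),
       Char.ofNat (65 + (PySem.Int.mod (PySem.Int.floordiv (col - 703) 26) 26).toNat),
       Char.ofNat (65 + (PySem.Int.mod (col - 703) 26).toNat)]
  String.mk (name ++ PySem.Int.toChars coords.2)

-- ===== PRECONDITION & SPEC =====
-- A raises ValueError outside 1 ≤ col ≤ 9999 and 1 ≤ row ≤ 9999.
def Pre_get_loc_from_coords (coords : Int × Int) : Prop :=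
  1 ≤ coords.1 ∧ coords.1 ≤ 9999 ∧ 1 ≤ coords.2 ∧ coords.2 ≤ 9999
instance (coords : Int × Int) : Decidable (Pre_get_loc_from_coords coords) := by
  unfold Pre_get_loc_from_coords; infer_instance
def pvWitness_get_loc_from_coords : (Int × Int) := (703, 5)

def Spec_get_loc_from_coords (coords : Int × Int) (out : String) : Prop :=
  out = get_loc_from_coords_alt coords
instance (coords : Int × Int) (out : String) : Decidable (Spec_get_loc_from_coords coords out) := by
  unfold Spec_get_loc_from_coords; infer_instance

-- ===== CLAIM (what is proved, stated in full; the proofs are below) =====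
def Claim_equal_get_loc_from_coords : Prop := ∀ (coords : Int × Int), Dom_get_loc_from_coords coords → Pre_get_loc_from_coords coords → Spec_get_loc_from_coords coords (get_loc_from_coords coords)

-- ===== LEMMAS AND PROOFS =====

-- uppercasing fixes any character B (and hence A's digits) produce
theorem upperChar_fix (m : Nat) (h : m < 26) :
    PySem.Chars.upperChar (Char.ofNat (m + 65)) = Char.ofNat (m + 65) := by
  interval_cases m <;> decide

-- A's loop on a valid column evaluates, in at most three steps, to B's closed-form digits
theorem pvALoop_closed (col : Int) (h1 : 1 ≤ col) (h2 : col ≤ 9999) (acc : List Char) :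
    pvALoop col acc =
      (if col ≤ 26 then
        [Char.ofNat (65 + (col - 1).toNat)]
      else if col ≤ 702 then
        [Char.ofNat (65 + (PySem.Int.floordiv (col - 27) 26).toNat),
         Char.ofNat (65 + (PySem.Int.mod (col - 27) 26).toNat)]
      else
        [Char.ofNat (65 + (PySem.Int.floordiv (col - 703) 676).toNat),
         Char.ofNat (65 + (PySem.Int.mod (PySem.Int.floordiv (col - 703) 26) 26).toNat),
         Char.ofNat (65 + (PySem.Int.mod (col - 703) 26).toNat)]) ++ acc := by
  have e1 : PySem.Int.floordiv (col - 1) 26 = (col - 1) / 26 :=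
    PySem.Int.floordiv_eq_ediv_of_pos (by omega)
  have m1 : PySem.Int.mod (col - 1) 26 = (col - 1) % 26 :=
    PySem.Int.mod_eq_emod_of_pos (by omega)
  rw [pvALoop, if_pos (show (0:Int) < col by omega), e1, m1, pvALoop]
  by_cases hc1 : col ≤ 26
  · rw [if_neg (show ¬ 0 < (col - 1) / 26 by omega), if_pos hc1,
        show ((col - 1) % 26).toNat + 65 = 65 + (col - 1).toNat by omega]
    simp
  · rw [if_pos (show 0 < (col - 1) / 26 by omega),
        PySem.Int.floordiv_eq_ediv_of_pos (show (0:Int) < 26 by omega),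
        PySem.Int.mod_eq_emod_of_pos (show (0:Int) < 26 by omega), pvALoop]
    by_cases hc2 : col ≤ 702
    · rw [if_neg (show ¬ 0 < ((col - 1) / 26 - 1) / 26 by omega), if_neg hc1, if_pos hc2,
          PySem.Int.floordiv_eq_ediv_of_pos (show (0:Int) < 26 by omega),
          PySem.Int.mod_eq_emod_of_pos (show (0:Int) < 26 by omega),
          show (((col - 1) / 26 - 1) % 26).toNat + 65 = 65 + ((col - 27) / 26).toNat by omega,
          show ((col - 1) % 26).toNat + 65 = 65 + ((col - 27) % 26).toNat by omega]
      simp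
    · rw [if_pos (show 0 < ((col - 1) / 26 - 1) / 26 by omega),
          PySem.Int.floordiv_eq_ediv_of_pos (show (0:Int) < 26 by omega),
          PySem.Int.mod_eq_emod_of_pos (show (0:Int) < 26 by omega), pvALoop,
          if_neg (show ¬ 0 < (((col - 1) / 26 - 1) / 26 - 1) / 26 by omega),
          if_neg hc1, if_neg hc2,
          PySem.Int.floordiv_eq_ediv_of_pos (show (0:Int) < 676 by omega),
          PySem.Int.floordiv_eq_ediv_of_pos (show (0:Int) < 26 by omega),
          PySem.Int.mod_eq_emod_of_pos (show (0:Int) < 26 by omega),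
          PySem.Int.mod_eq_emod_of_pos (show (0:Int) < 26 by omega),
          show ((((col - 1) / 26 - 1) / 26 - 1) % 26).toNat + 65
              = 65 + ((col - 703) / 676).toNat by omega,
          show (((col - 1) / 26 - 1) % 26).toNat + 65
              = 65 + ((col - 703) / 26 % 26).toNat by omega,
          show ((col - 1) % 26).toNat + 65 = 65 + ((col - 703) % 26).toNat by omega]
      simp

-- ===== VERDICT (by name: the statement is the Claim_ definition above) =====
theorem get_loc_from_coords_spec : Claim_equal_get_loc_from_coords := by
  intro coords _ hpre
  obtain ⟨h1, h2, _, _⟩ := hpre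
  unfold Spec_get_loc_from_coords get_loc_from_coords get_loc_from_coords_alt
  rw [pvALoop_closed coords.1 h1 h2 []]
  simp only [List.append_nil]
  congr 1
  congr 1
  split_ifs with hc1 hc2
  · simp only [PySem.Chars.upper, List.map]
    rw [show 65 + (coords.1 - 1).toNat = (coords.1 - 1).toNat + 65 from by omega,
        upperChar_fix _ (by omega)]
  · have ef : PySem.Int.floordiv (coords.1 - 27) 26 = (coords.1 - 27) / 26 :=
      PySem.Int.floordiv_eq_ediv_of_pos (by omega)
    have mf : PySem.Int.mod (coords.1 - 27) 26 = (coords.1 - 27) % 26 :=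
      PySem.Int.mod_eq_emod_of_pos (by omega)
    simp only [PySem.Chars.upper, List.map, ef, mf]
    rw [show 65 + ((coords.1 - 27) / 26).toNat = ((coords.1 - 27) / 26).toNat + 65 from by omega,
        upperChar_fix _ (by omega),
        show 65 + ((coords.1 - 27) % 26).toNat = ((coords.1 - 27) % 26).toNat + 65 from by omega,
        upperChar_fix _ (by omega)]
  · have ef : PySem.Int.floordiv (coords.1 - 703) 676 = (coords.1 - 703) / 676 :=
      PySem.Int.floordiv_eq_ediv_of_pos (by omega)
    have eg : PySem.Int.floordiv (coords.1 - 703) 26 = (coords.1 - 703) / 26 :=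
      PySem.Int.floordiv_eq_ediv_of_pos (by omega)
    have mg : PySem.Int.mod ((coords.1 - 703) / 26) 26 = ((coords.1 - 703) / 26) % 26 :=
      PySem.Int.mod_eq_emod_of_pos (by omega)
    have mf : PySem.Int.mod (coords.1 - 703) 26 = (coords.1 - 703) % 26 :=
      PySem.Int.mod_eq_emod_of_pos (by omega)
    simp only [PySem.Chars.upper, List.map, ef, eg, mg, mf]
    rw [show 65 + ((coords.1 - 703) / 676).toNat = ((coords.1 - 703) / 676).toNat + 65 from by omega,
        upperChar_fix _ (by omega),
        show 65 + ((coords.1 - 703) / 26 % 26).toNat = ((coords.1 - 703) / 26 % 26).toNat + 65 from by omega,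
        upperChar_fix _ (by omega),
        show 65 + ((coords.1 - 703) % 26).toNat = ((coords.1 - 703) % 26).toNat + 65 from by omega,
        upperChar_fix _ (by omega)]
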